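-- pv_equiv track=rewrite | github.com/jinec/Seq2Seq_chatbot-version01 | data_03_utils.py | indice_sentence
-- ===== SOURCE A (Python) =====
-- EOS = '<eos>'
--
-- UNK = '<unk>'
--
-- PAD = '<pad>'
--
-- GO = '<go>'
--
-- def indice_sentence(indice,index_word):
--     ret = []
--     for index in indice:
--         word = index_word[index]
--         if word == EOS:
--             break
--         if word != UNK and word != GO and word != PAD:
--             ret.append(word)
--     return ''.join(ret)
-- ===== SOURCE B (Python) =====
-- EOS = '<eos>'
-- UNK = '<unk>'
-- PAD = '<pad>'
-- GO = '<go>'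
--
-- def indice_sentence(indice, index_word):
--     # stage 1: find the position of the first EOS word (or the end)
--     cut = 0
--     n = len(indice)
--     while cut < n and index_word[indice[cut]] != EOS:
--         cut += 1
--     # stage 2: join the non-special words of the prefix before the cut
--     return ''.join(index_word[i] for i in indice[:cut]
--                    if index_word[i] not in (UNK, GO, PAD))
-- ===== Notes on version B (the rewrite author's own statement) =====
-- stated objective: alternative
-- what changed: Replaced A's single accumulator loop with break by a staged two-pass algorithm: a while-loop first computes the cut position of the first EOS, then a second pass over the slice indice[:cut] filters the special tokens and joins, so no accumulator or break is needed.
import Mathlib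
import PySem

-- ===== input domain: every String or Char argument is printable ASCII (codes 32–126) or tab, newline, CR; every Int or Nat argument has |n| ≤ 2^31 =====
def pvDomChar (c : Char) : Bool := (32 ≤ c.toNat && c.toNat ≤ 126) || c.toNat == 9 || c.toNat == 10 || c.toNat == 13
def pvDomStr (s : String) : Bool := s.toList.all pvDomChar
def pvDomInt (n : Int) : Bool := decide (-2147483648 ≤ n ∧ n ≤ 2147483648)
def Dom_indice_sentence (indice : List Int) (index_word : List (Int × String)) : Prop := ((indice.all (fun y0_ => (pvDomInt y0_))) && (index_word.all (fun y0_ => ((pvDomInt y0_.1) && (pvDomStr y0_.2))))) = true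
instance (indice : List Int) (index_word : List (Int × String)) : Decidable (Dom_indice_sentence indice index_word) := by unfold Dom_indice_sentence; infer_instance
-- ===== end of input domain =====

-- B replaces A's single accumulator loop with break by a staged two-pass algorithm:
-- a while-loop first finds the cut position of the first EOS, then a second pass
-- over the prefix before the cut filters the special tokens and joins (same cost).

-- ===== PORT A =====
-- A's loop: accumulate `ret`, break on EOS; a missing key is a KeyError (excluded by Pre_;
-- the port then returns the words collected so far, a value the claim never relies on).
def pvLoopA (index_word : List (Int × String)) : List Int → List String → List String
  | [], ret => ret
  | i :: rest, ret =>
    match index_word.lookup i with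
    | none => ret
    | some w =>
      if w = "<eos>" then ret
      else if w ≠ "<unk>" ∧ w ≠ "<go>" ∧ w ≠ "<pad>" then pvLoopA index_word rest (ret ++ [w])
      else pvLoopA index_word rest ret

def indice_sentence (indice : List Int) (index_word : List (Int × String)) : String :=
  PySem.Str.join "" (pvLoopA index_word indice [])

-- ===== PORT B =====
-- stage 1 of Source B: the while-loop computing the cut position of the first EOS;
-- on a missing key the Python loop raises KeyError (excluded by Pre_; the port stops there).
def pvCutB (index_word : List (Int × String)) : List Int → Nat
  | [] => 0
  | i :: rest =>
    match index_word.lookup i with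
    | none => 0
    | some w => if w = "<eos>" then 0 else 1 + pvCutB index_word rest

-- stage 2 of Source B: join the non-special words of indice[:cut] (List.take = the [:cut] slice).
def indice_sentence_alt (indice : List Int) (index_word : List (Int × String)) : String :=
  PySem.Str.join ""
    (((indice.take (pvCutB index_word indice)).map
        (fun i => (index_word.lookup i).getD "")).filter
      (fun w => !(w == "<unk>" || w == "<go>" || w == "<pad>")))

-- ===== PRECONDITION & SPEC =====
-- Pre_ excludes exactly the inputs on which Python A raises KeyError: some index, reached
-- before the first EOS word, is not a key of index_word (B raises the same KeyError there).
def Pre_indice_sentence (indice : List Int) (index_word : List (Int × String)) : Prop :=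
  ∀ k < indice.length,
    (∀ j < k, ((index_word.lookup (indice.getD j 0)).getD "<eos>") ≠ "<eos>") →
    (index_word.lookup (indice.getD k 0)).isSome = true

instance (indice : List Int) (index_word : List (Int × String)) : Decidable (Pre_indice_sentence indice index_word) := by unfold Pre_indice_sentence; infer_instance

def pvWitness_indice_sentence : List Int × (List (Int × String)) := ([0, 1], [(0, "hi"), (1, "<eos>")])

def Spec_indice_sentence (indice : List Int) (index_word : List (Int × String)) (out : String) : Prop := out = indice_sentence_alt indice index_word
instance (indice : List Int) (index_word : List (Int × String)) (out : String) : Decidable (Spec_indice_sentence indice index_word out) := by unfold Spec_indice_sentence; infer_instance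

-- ===== CLAIM =====
def Claim_equal_indice_sentence : Prop := ∀ (indice : List Int) (index_word : List (Int × String)), Dom_indice_sentence indice index_word → Pre_indice_sentence indice index_word → Spec_indice_sentence indice index_word (indice_sentence indice index_word)

-- ===== LEMMAS AND PROOFS =====
-- Loop invariant: A's accumulator loop equals the accumulator prepended to the filtered
-- word list of the prefix before B's cut (this even holds where both hit a missing key).
theorem pvLoopA_eq_cut (index_word : List (Int × String)) (l : List Int) (ret : List String) :
    pvLoopA index_word l ret
      = ret ++ ((l.take (pvCutB index_word l)).map
            (fun i => (index_word.lookup i).getD "")).filter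
          (fun w => !(w == "<unk>" || w == "<go>" || w == "<pad>")) := by
  induction l generalizing ret with
  | nil => simp [pvLoopA, pvCutB]
  | cons i rest ih =>
    simp only [pvLoopA, pvCutB]
    cases h : index_word.lookup i with
    | none => simp
    | some w =>
      by_cases he : w = "<eos>"
      · simp [he]
      · by_cases hs : w ≠ "<unk>" ∧ w ≠ "<go>" ∧ w ≠ "<pad>"
        · simp [he, hs, ih, h, Nat.one_add, List.take_succ_cons]
        · simp [he, hs, ih, h, Nat.one_add, List.take_succ_cons]
          rw [List.filter_cons_of_neg (by simpa using hs)]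

-- ===== VERDICT =====
theorem indice_sentence_spec : Claim_equal_indice_sentence := by
  intro indice index_word _ _
  unfold Spec_indice_sentence indice_sentence indice_sentence_alt
  rw [pvLoopA_eq_cut]
  simp
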